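-- pv_equiv track=rewrite | github.com/0Desom0/Desom-OlivaDice-Plugin | 娱乐/QQGroupForward/main.py | getMatchWordStartRight
-- ===== SOURCE A (Python) =====
-- def getMatchWordStartRight(data, key, ignoreCase=True):
--     tmp_output_str = ''
--     tmp_data = data.strip()
--     tmp_keys = [key] if isinstance(key, str) else key
--     if ignoreCase:
--         tmp_data = tmp_data.lower()
--         tmp_keys = [k.lower() for k in tmp_keys]
--     # 按长度从长到短排序
--     tmp_keys_sorted = sorted(tmp_keys, key=lambda x: len(x), reverse=True)
--     for tmp_key in tmp_keys_sorted:
--         if len(tmp_data) >= len(tmp_key):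
--             if tmp_data[:len(tmp_key)] == tmp_key:
--                 tmp_output_str = data.strip()[len(tmp_key):]
--                 break
--     return tmp_output_str
-- ===== SOURCE B (Python) =====
-- def getMatchWordStartRight(data, key, ignoreCase=True):
--     s = data.strip()
--     cmp = s.lower() if ignoreCase else s
--     keys = [key] if isinstance(key, str) else key
--     best = None
--     for k in keys:
--         kk = k.lower() if ignoreCase else k
--         if cmp.startswith(kk) and (best is None or len(kk) > best):
--             best = len(kk)
--     return s[best:] if best is not None else ''
-- ===== Notes on version B (the rewrite author's own statement) =====
-- stated objective: simpler
-- what changed: Dropped the length-descending sort entirely: a single pass tracks the maximum length of any matching prefix key (the output depends only on the matched key's length), then slices once.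
import Mathlib
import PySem

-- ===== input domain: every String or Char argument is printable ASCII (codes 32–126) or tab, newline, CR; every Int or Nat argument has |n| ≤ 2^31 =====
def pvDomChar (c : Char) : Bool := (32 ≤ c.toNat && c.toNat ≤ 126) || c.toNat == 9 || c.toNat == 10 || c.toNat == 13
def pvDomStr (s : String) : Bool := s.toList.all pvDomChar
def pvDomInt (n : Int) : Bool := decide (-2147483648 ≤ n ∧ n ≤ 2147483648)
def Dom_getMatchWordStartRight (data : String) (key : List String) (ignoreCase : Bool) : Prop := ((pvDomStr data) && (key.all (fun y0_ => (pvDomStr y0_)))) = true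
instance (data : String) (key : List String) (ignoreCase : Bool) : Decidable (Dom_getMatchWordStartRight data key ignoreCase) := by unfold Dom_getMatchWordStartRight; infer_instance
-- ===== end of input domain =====

-- B drops A's length-descending sort: one pass keeps the max length of any matching prefix key, then slices once (objective: simpler).

-- ===== PORT A =====
-- A's for-loop with break: first key (in length-descending order) passing the guard wins.
def pvLoopA (tmpData s : String) : List String → String
  | [] => ""
  | k :: rest =>
    if PySem.Str.len k ≤ PySem.Str.len tmpData then
      if PySem.Str.slice tmpData none (some (PySem.Str.len k)) == k then
        PySem.Str.slice s (some (PySem.Str.len k)) none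
      else pvLoopA tmpData s rest
    else pvLoopA tmpData s rest

def getMatchWordStartRight (data : String) (key : List String) (ignoreCase : Bool) : String :=
  let s := PySem.Str.strip data
  let tmpData := if ignoreCase then PySem.Str.lower s else s
  let tmpKeys := if ignoreCase then key.map PySem.Str.lower else key
  let tmpKeysSorted := PySem.List.sorted tmpKeys (fun x => PySem.Str.len x) true
  pvLoopA tmpData s tmpKeysSorted

-- ===== PORT B =====
def pvStepB (ignoreCase : Bool) (cmp : String) (best : Option Int) (k : String) : Option Int :=
  let kk := if ignoreCase then PySem.Str.lower k else k
  if PySem.Str.startswith cmp kk &&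
      (match best with | none => true | some b => decide (b < PySem.Str.len kk)) then
    some (PySem.Str.len kk)
  else best

def getMatchWordStartRight_alt (data : String) (key : List String) (ignoreCase : Bool) : String :=
  let s := PySem.Str.strip data
  let cmp := if ignoreCase then PySem.Str.lower s else s
  let best := key.foldl (pvStepB ignoreCase cmp) none
  match best with
  | some b => PySem.Str.slice s (some b) none
  | none => ""

-- ===== PRECONDITION & SPEC =====
def Spec_getMatchWordStartRight (data : String) (key : List String) (ignoreCase : Bool) (out : String) : Prop := out = getMatchWordStartRight_alt data key ignoreCase
instance (data : String) (key : List String) (ignoreCase : Bool) (out : String) : Decidable (Spec_getMatchWordStartRight data key ignoreCase out) := by unfold Spec_getMatchWordStartRight; infer_instance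

-- ===== CLAIM (what is proved, stated in full; the proofs are below) =====
def Claim_equal_getMatchWordStartRight : Prop := ∀ (data : String) (key : List String) (ignoreCase : Bool), Dom_getMatchWordStartRight data key ignoreCase → Spec_getMatchWordStartRight data key ignoreCase (getMatchWordStartRight data key ignoreCase)

-- ===== LEMMAS AND PROOFS =====
-- max on optional values (the shape of B's running best)
def pvBmax : Option Int → Option Int → Option Int
  | none, b => b
  | some a, none => some a
  | some a, some b => some (max a b)

-- maximum length of a key in the list that is a prefix of cmp
def pvMaxLen (cmp : String) : List String → Option Int
  | [] => none
  | k :: t => if PySem.Str.startswith cmp k then pvBmax (some (PySem.Str.len k)) (pvMaxLen cmp t) else pvMaxLen cmp t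

theorem pvBmax_assoc (a b c : Option Int) : pvBmax (pvBmax a b) c = pvBmax a (pvBmax b c) := by
  cases a <;> cases b <;> cases c <;> simp [pvBmax, max_assoc]

theorem pvBmax_left_comm (a b c : Option Int) : pvBmax a (pvBmax b c) = pvBmax b (pvBmax a c) := by
  cases a <;> cases b <;> cases c <;> simp [pvBmax, max_left_comm, max_comm]

-- A's guard (length check + slice equality) is exactly startswith
theorem pvGuard_iff (tmpData k : String) :
    PySem.Str.startswith tmpData k = true ↔
      (PySem.Str.len k ≤ PySem.Str.len tmpData ∧ PySem.Str.slice tmpData none (some (PySem.Str.len k)) = k) := by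
  rw [PySem.Str.startswith_eq, PySem.Chars.startswith_iff]
  constructor
  · intro h
    have hl := h.length_le
    refine ⟨by simp [PySem.Str.len_eq]; exact_mod_cast hl, ?_⟩
    apply String.toList_inj.mp
    rw [PySem.Str.toList_slice]
    simp only [PySem.Str.len_eq, PySem.Chars.slice]
    rw [PySem.List.slice_to_natCast]
    simpa using (List.prefix_iff_eq_take.mp h).symm
  · rintro ⟨hl, hs⟩
    have := congrArg String.toList hs
    rw [PySem.Str.toList_slice] at this
    simp only [PySem.Str.len_eq, PySem.Chars.slice] at this
    rw [PySem.List.slice_to_natCast] at this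
    rw [← this]
    exact List.take_prefix _ _

theorem pvLoopA_cons (tmpData s k : String) (rest : List String) :
    pvLoopA tmpData s (k :: rest) =
      if PySem.Str.startswith tmpData k then PySem.Str.slice s (some (PySem.Str.len k)) none
      else pvLoopA tmpData s rest := by
  by_cases h : PySem.Str.startswith tmpData k = true
  · obtain ⟨hl, hs⟩ := (pvGuard_iff tmpData k).mp h
    simp only [pvLoopA]
    rw [if_pos hl, if_pos (beq_iff_eq.mpr hs), if_pos h]
  · simp only [pvLoopA]
    rw [if_neg h]
    by_cases hl : PySem.Str.len k ≤ PySem.Str.len tmpData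
    · have hs : ¬ (PySem.Str.slice tmpData none (some (PySem.Str.len k)) == k) = true := by
        intro hs
        exact h ((pvGuard_iff tmpData k).mpr ⟨hl, beq_iff_eq.mp hs⟩)
      rw [if_pos hl, if_neg hs]
    · rw [if_neg hl]

-- any value of pvMaxLen is bounded by a bound on all lengths in the list
theorem pvMaxLen_le (cmp : String) (t : List String) (c : Int)
    (hb : ∀ b ∈ t, PySem.Str.len b ≤ c) : ∀ m, pvMaxLen cmp t = some m → m ≤ c := by
  induction t with
  | nil => intro m h; simp [pvMaxLen] at h
  | cons x xs ih =>
    intro m h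
    have hx := hb x (by simp)
    have ih' := ih (fun b hbmem => hb b (by simp [hbmem]))
    simp only [pvMaxLen] at h
    by_cases hp : PySem.Str.startswith cmp x = true
    · rw [if_pos hp] at h
      cases hml : pvMaxLen cmp xs with
      | none =>
        rw [hml] at h
        simp only [pvBmax, Option.some.injEq] at h
        omega
      | some v =>
        rw [hml] at h
        simp only [pvBmax, Option.some.injEq] at h
        have := ih' v hml
        rcases max_cases (PySem.Str.len x) v with ⟨he, _⟩ | ⟨he, _⟩ <;> omega
    · rw [if_neg hp] at h; exact ih' m h

-- A's loop on a length-descending list returns the slice at the max matching length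
theorem pvLoopA_eq (tmpData s : String) (l : List String)
    (hp : l.Pairwise (fun a b => PySem.Str.len b ≤ PySem.Str.len a)) :
    pvLoopA tmpData s l =
      match pvMaxLen tmpData l with
      | none => ""
      | some m => PySem.Str.slice s (some m) none := by
  induction l with
  | nil => simp [pvLoopA, pvMaxLen]
  | cons k rest ih =>
    rw [pvLoopA_cons]
    rw [List.pairwise_cons] at hp
    by_cases h : PySem.Str.startswith tmpData k = true
    · rw [if_pos h]
      simp only [pvMaxLen]
      rw [if_pos h]
      cases hml : pvMaxLen tmpData rest with
      | none => simp [pvBmax]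
      | some v =>
        have hv : v ≤ PySem.Str.len k := pvMaxLen_le tmpData rest _ hp.1 v hml
        simp only [pvBmax]
        rw [max_eq_left hv]
    · rw [if_neg h]
      simp only [pvMaxLen]
      rw [if_neg h]
      exact ih hp.2

-- pvMaxLen is invariant under permutation
theorem pvMaxLen_perm (cmp : String) {l l' : List String} (h : l.Perm l') :
    pvMaxLen cmp l = pvMaxLen cmp l' := by
  induction h with
  | nil => rfl
  | cons x _ ih => simp only [pvMaxLen, ih]
  | swap x y l =>
    simp only [pvMaxLen]
    by_cases hx : PySem.Str.startswith cmp x = true <;>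
      by_cases hy : PySem.Str.startswith cmp y = true
    · simp only [if_pos hx, if_pos hy]
      exact pvBmax_left_comm _ _ _
    · simp only [if_pos hx, if_neg hy]
    · simp only [if_neg hx, if_pos hy]
    · simp only [if_neg hx, if_neg hy]
  | trans _ _ ih1 ih2 => exact ih1.trans ih2

-- B's step rewritten with pvBmax
theorem pvStepB_bmax (ignoreCase : Bool) (cmp : String) (best : Option Int) (k : String) :
    pvStepB ignoreCase cmp best k =
      if PySem.Str.startswith cmp (if ignoreCase then PySem.Str.lower k else k) then
        pvBmax best (some (PySem.Str.len (if ignoreCase then PySem.Str.lower k else k)))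
      else best := by
  cases best with
  | none =>
    simp only [pvStepB, Bool.and_true, pvBmax]
  | some b =>
    by_cases h : PySem.Str.startswith cmp (if ignoreCase then PySem.Str.lower k else k) = true
    · simp only [pvStepB, h, Bool.true_and, decide_eq_true_eq, pvBmax]
      rw [if_pos trivial]
      by_cases hb : b < PySem.Str.len (if ignoreCase then PySem.Str.lower k else k)
      · rw [if_pos hb, max_eq_right hb.le]
      · rw [if_neg hb, max_eq_left (not_lt.mp hb)]
    · have hcond : ¬ ((PySem.Str.startswith cmp (if ignoreCase then PySem.Str.lower k else k) &&
          decide (b < PySem.Str.len (if ignoreCase then PySem.Str.lower k else k))) = true) := by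
        simp only [Bool.and_eq_true]
        intro hc
        exact absurd hc.1 h
      simp only [pvStepB]
      rw [if_neg hcond, if_neg h]

-- B's fold computes pvBmax of the accumulator and the max matching length
theorem pvFoldB_eq (ignoreCase : Bool) (cmp : String) (L : List String) (acc : Option Int) :
    L.foldl (pvStepB ignoreCase cmp) acc =
      pvBmax acc (pvMaxLen cmp (if ignoreCase then L.map PySem.Str.lower else L)) := by
  induction L generalizing acc with
  | nil => cases ignoreCase <;> cases acc <;> simp [pvMaxLen, pvBmax]
  | cons k t ih =>
    have hmap : (if ignoreCase then (k :: t).map PySem.Str.lower else k :: t) =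
        (if ignoreCase then PySem.Str.lower k else k) :: (if ignoreCase then t.map PySem.Str.lower else t) := by
      cases ignoreCase <;> simp
    rw [List.foldl_cons, ih, pvStepB_bmax, hmap]
    simp only [pvMaxLen]
    by_cases h : PySem.Str.startswith cmp (if ignoreCase then PySem.Str.lower k else k) = true
    · rw [if_pos h, if_pos h, pvBmax_assoc]
    · rw [if_neg h, if_neg h]

-- ===== VERDICT (by name: the statement is the Claim_ definition above) =====
theorem getMatchWordStartRight_spec : Claim_equal_getMatchWordStartRight := by
  intro data key ignoreCase _
  unfold Spec_getMatchWordStartRight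
  simp only [getMatchWordStartRight, getMatchWordStartRight_alt]
  rw [pvFoldB_eq]
  rw [pvLoopA_eq _ _ _ (PySem.List.sorted_pairwise_rev _ _)]
  rw [pvMaxLen_perm _ (PySem.List.sorted_perm _ _ _)]
  cases pvMaxLen (if ignoreCase then PySem.Str.lower (PySem.Str.strip data) else PySem.Str.strip data)
      (if ignoreCase then key.map PySem.Str.lower else key) <;> simp [pvBmax]
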